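-- pv_equiv track=rewrite | github.com/Avery2/wordle-helper | play.py | known_positions_from_guess
-- ===== SOURCE A (Python) =====
-- def known_positions_from_guess(guess):
--     guess = guess.replace("_", "")
--     acc = ""
--     next_marked = False
--     for c in guess:
--         if next_marked:
--             acc += c
--             next_marked = False
--         elif c not in ("*", "_"):
--             acc += "-"
--         next_marked = c == "*"
--     return acc
-- ===== SOURCE B (Python) =====
-- def known_positions_from_guess(guess):
--     s = guess.replace("_", "")
--     n = len(s)
--     parts = []
--     i = 0
--     while i < n:
--         if s[i] == "*":
--             j = i + 1
--             while j < n and s[j] == "*":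
--                 j += 1
--             parts.append(s[i + 1:j])
--             if j < n:
--                 parts.append(s[j])
--             i = j + 1
--         else:
--             parts.append("-")
--             i += 1
--     return "".join(parts)
-- ===== Notes on version B (the rewrite author's own statement) =====
-- stated objective: alternative
-- what changed: Replaces A's per-character scan with a carried next_marked flag by a stateless index-jumping block scanner: an inner while locates each maximal run of '*', the run's tail s[i+1:j] and the single captured character after it are emitted as whole blocks, and the index jumps past the run, so no flag is threaded between iterations.
import Mathlib
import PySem

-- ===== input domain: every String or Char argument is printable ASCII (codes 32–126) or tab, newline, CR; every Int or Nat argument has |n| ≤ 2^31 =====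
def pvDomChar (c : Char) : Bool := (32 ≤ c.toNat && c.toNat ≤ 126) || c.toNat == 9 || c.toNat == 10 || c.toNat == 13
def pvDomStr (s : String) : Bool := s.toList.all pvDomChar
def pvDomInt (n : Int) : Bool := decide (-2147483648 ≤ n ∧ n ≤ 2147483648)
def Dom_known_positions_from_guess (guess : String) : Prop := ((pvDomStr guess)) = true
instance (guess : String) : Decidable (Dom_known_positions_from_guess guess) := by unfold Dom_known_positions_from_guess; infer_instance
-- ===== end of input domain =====

-- B replaces A's per-character flag pass by a block scanner over maximal '*'-runs
-- (inner while + slice emission, index jumps); objective: alternative decomposition.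


-- ===== PORT A =====
-- acc is Python's growing string, carried as List Char; next_marked is the Bool flag.
def kpfgStepA (st : List Char × Bool) (c : Char) : List Char × Bool :=
  let acc := if st.2 then st.1 ++ [c]
             else if c ≠ '*' ∧ c ≠ '_' then st.1 ++ ['-']
             else st.1
  (acc, c == '*')

def known_positions_from_guess (guess : String) : String :=
  let g := PySem.Str.replace guess "_" ""
  String.mk ((g.toList.foldl kpfgStepA ([], false)).1)

-- ===== PORT B =====
-- Source B's outer while over the index i, as structural recursion on the remaining suffix:
-- at a '*', the inner while `while j < n and s[j] == "*"` is the takeWhile over the tail,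
-- the slice s[i+1:j] is that star-run tail, s[j] (if any) is the head of the dropWhile.
def kpfgGo (l : List Char) : List Char :=
  match l with
  | [] => []
  | c :: t =>
    if c = '*' then
      t.takeWhile (· == '*') ++
        (match h : t.dropWhile (· == '*') with
         | [] => []
         | x :: r => x :: kpfgGo r)
    else '-' :: kpfgGo t
termination_by l.length
decreasing_by
  · have h1 : (t.dropWhile (· == '*')).length ≤ t.length := t.length_dropWhile_le _
    rw [h] at h1
    simp at h1 ⊢
    omega
  · simp

def known_positions_from_guess_alt (guess : String) : String :=
  let s := PySem.Str.replace guess "_" ""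
  String.mk (kpfgGo s.toList)

-- ===== PRECONDITION & SPEC =====
def Spec_known_positions_from_guess (guess : String) (out : String) : Prop := out = known_positions_from_guess_alt guess
instance (guess : String) (out : String) : Decidable (Spec_known_positions_from_guess guess out) := by unfold Spec_known_positions_from_guess; infer_instance

-- ===== CLAIM (what is proved, stated in full; the proofs are below) =====
def Claim_equal_known_positions_from_guess : Prop := ∀ (guess : String), Dom_known_positions_from_guess guess → Spec_known_positions_from_guess guess (known_positions_from_guess guess)

-- ===== LEMMAS AND PROOFS =====

-- proof-side helper: B's behaviour when the previous character was a '*'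
def kpfgGoT : List Char → List Char
  | [] => []
  | x :: r => x :: (if x = '*' then kpfgGoT r else kpfgGo r)

lemma kpfgGoT_eq (l : List Char) :
    kpfgGoT l = l.takeWhile (· == '*') ++
      (match l.dropWhile (· == '*') with
       | [] => []
       | x :: r => x :: kpfgGo r) := by
  induction l with
  | nil => simp [kpfgGoT]
  | cons x r ih =>
    by_cases hx : x = '*'
    · subst hx
      simp [kpfgGoT, List.dropWhile_cons, ih]
    · simp [kpfgGoT, List.dropWhile_cons, hx]

lemma kpfgGo_star (t : List Char) : kpfgGo ('*' :: t) = kpfgGoT t := by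
  rw [kpfgGo, if_pos rfl, kpfgGoT_eq]
  cases hd : t.dropWhile (· == '*') <;> simp

-- s.replace("_","") with a single-char pattern and empty replacement is a filter.
lemma kpfg_replace_go_filter : ∀ (fuel : Nat) (l acc : List Char), l.length ≤ fuel →
    PySem.Chars.replace.go ['_'] [] fuel l acc = acc.reverse ++ l.filter (· ≠ '_') := by
  intro fuel
  induction fuel with
  | zero =>
    intro l acc h
    have : l = [] := List.eq_nil_of_length_eq_zero (Nat.le_zero.mp h)
    subst this
    simp [PySem.Chars.replace.go]
  | succ n ih =>
    intro l acc h
    cases l with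
    | nil => simp [PySem.Chars.replace.go]
    | cons c t =>
      by_cases hc : c = '_'
      · subst hc
        have hpre : List.isPrefixOf ['_'] ('_' :: t) = true := by
          simp [List.isPrefixOf]
        simp only [PySem.Chars.replace.go, hpre, if_pos, List.length_cons, List.drop_succ_cons,
          List.length_nil, List.drop_zero, List.reverse_nil, List.nil_append]
        rw [ih t acc (by simpa using Nat.le_of_succ_le_succ h)]
        simp
      · have hpre : List.isPrefixOf ['_'] (c :: t) = false := by
          simp [List.isPrefixOf, Ne.symm hc]
        simp only [PySem.Chars.replace.go, hpre]
        rw [if_neg (by simp), ih t (c :: acc) (by simpa using Nat.le_of_succ_le_succ h)]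
        simp [hc]

lemma kpfg_replace_eq_filter (l : List Char) :
    PySem.Chars.replace l ['_'] [] = l.filter (· ≠ '_') := by
  rw [PySem.Chars.replace]
  simp only [List.isEmpty_cons]
  rw [if_neg (by simp)]
  exact kpfg_replace_go_filter l.length l [] le_rfl

-- core loop equivalence: A's fold with flag false computes kpfgGo, with flag true kpfgGoT
lemma kpfg_loop (l : List Char) : '_' ∉ l →
    (∀ acc, (l.foldl kpfgStepA (acc, false)).1 = acc ++ kpfgGo l) ∧
    (∀ acc, (l.foldl kpfgStepA (acc, true)).1 = acc ++ kpfgGoT l) := by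
  induction l with
  | nil => intro _; constructor <;> intro acc <;> simp [kpfgGo, kpfgGoT]
  | cons c t ih =>
    intro hmem
    have hc : c ≠ '_' := fun h => hmem (h ▸ List.mem_cons_self ..)
    have ht : '_' ∉ t := fun h => hmem (List.mem_cons_of_mem _ h)
    obtain ⟨ihF, ihT⟩ := ih ht
    constructor
    · intro acc
      by_cases hcs : c = '*'
      · subst hcs
        have hstep : kpfgStepA (acc, false) '*' = (acc, true) := by
          simp [kpfgStepA]
        rw [List.foldl_cons, hstep, ihT, kpfgGo_star]
      · have hstep : kpfgStepA (acc, false) c = (acc ++ ['-'], false) := by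
          simp [kpfgStepA, hcs, hc]
        rw [List.foldl_cons, hstep, ihF, kpfgGo, if_neg hcs]
        simp
    · intro acc
      by_cases hcs : c = '*'
      · subst hcs
        have hstep : kpfgStepA (acc, true) '*' = (acc ++ ['*'], true) := by
          simp [kpfgStepA]
        rw [List.foldl_cons, hstep, ihT]
        simp [kpfgGoT]
      · have hstep : kpfgStepA (acc, true) c = (acc ++ [c], false) := by
          simp [kpfgStepA, hcs]
        rw [List.foldl_cons, hstep, ihF]
        simp [kpfgGoT, hcs]

-- ===== VERDICT (by name: the statement is the Claim_ definition above) =====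
theorem known_positions_from_guess_spec : Claim_equal_known_positions_from_guess := by
  intro guess _
  unfold Spec_known_positions_from_guess known_positions_from_guess known_positions_from_guess_alt
  have hrep : (PySem.Str.replace guess "_" "").toList
      = guess.toList.filter (· ≠ '_') := by
    rw [PySem.Str.toList_replace]
    exact kpfg_replace_eq_filter _
  have hmem : '_' ∉ (PySem.Str.replace guess "_" "").toList := by
    rw [hrep]; simp
  exact congrArg String.mk (((kpfg_loop _ hmem).1 []).trans (by simp))
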